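-- pv_equiv track=rewrite | github.com/jeppete/jpamb-debloating-group-21 | solutions/pipeline_evaluation.py | _build_line_table
-- ===== SOURCE A (Python) =====
-- from typing import Dict, List, Set, Optional
--
-- def _build_line_table(line_entries: List[dict], all_offsets: Set[int]) -> Dict[int, int]:
--     """
--     Build a mapping from bytecode offset to source line number.
--
--     The line number table entries indicate that a range of bytecode offsets
--     starting at 'offset' corresponds to 'line'. We expand this to map each
--     individual offset to its line.
--     """
--     if not line_entries:
--         return {}
--
--     # Sort entries by offset
--     sorted_entries = sorted(line_entries, key=lambda e: e.get('offset', 0))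
--
--     line_table = {}
--     for i, entry in enumerate(sorted_entries):
--         start_offset = entry.get('offset', 0)
--         line = entry.get('line', 0)
--
--         # Find the end offset (start of next entry or infinity)
--         if i + 1 < len(sorted_entries):
--             end_offset = sorted_entries[i + 1].get('offset', 0)
--         else:
--             end_offset = float('inf')
--
--         # Map all offsets in this range to this line
--         for offset in all_offsets:
--             if start_offset <= offset < end_offset:
--                 line_table[offset] = line
--
--     return line_table
-- ===== SOURCE B (Python) =====
-- def _bisect_right(a, x):
--     # rightmost insertion point: first index i with x < a[i] (hand-written
--     # binary search, same algorithm as the stdlib's bisect.bisect_right)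
--     lo = 0
--     hi = len(a)
--     while lo < hi:
--         mid = (lo + hi) // 2
--         if x < a[mid]:
--             hi = mid
--         else:
--             lo = mid + 1
--     return lo
--
--
-- def _build_line_table(line_entries, all_offsets):
--     if not line_entries:
--         return {}
--     sorted_entries = sorted(line_entries, key=lambda e: e.get('offset', 0))
--     starts = [e.get('offset', 0) for e in sorted_entries]
--     lines = [e.get('line', 0) for e in sorted_entries]
--     # bucket each offset under the rightmost entry whose start <= offset
--     buckets = [[] for _ in starts]
--     for offset in all_offsets:
--         lo = _bisect_right(starts, offset)
--         if lo > 0: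
--             buckets[lo - 1].append(offset)
--     line_table = {}
--     for line, bucket in zip(lines, buckets):
--         for offset in bucket:
--             line_table[offset] = line
--     return line_table
-- ===== Notes on version B (the rewrite author's own statement) =====
-- stated objective: faster
-- what changed: Instead of scanning all offsets once per entry (nested loops), B sorts the entries once, binary-searches each offset for the rightmost entry whose start is <= it, collects the offsets into per-entry buckets, and emits the buckets in entry order, preserving A's exact dict insertion order.
import Mathlib
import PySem

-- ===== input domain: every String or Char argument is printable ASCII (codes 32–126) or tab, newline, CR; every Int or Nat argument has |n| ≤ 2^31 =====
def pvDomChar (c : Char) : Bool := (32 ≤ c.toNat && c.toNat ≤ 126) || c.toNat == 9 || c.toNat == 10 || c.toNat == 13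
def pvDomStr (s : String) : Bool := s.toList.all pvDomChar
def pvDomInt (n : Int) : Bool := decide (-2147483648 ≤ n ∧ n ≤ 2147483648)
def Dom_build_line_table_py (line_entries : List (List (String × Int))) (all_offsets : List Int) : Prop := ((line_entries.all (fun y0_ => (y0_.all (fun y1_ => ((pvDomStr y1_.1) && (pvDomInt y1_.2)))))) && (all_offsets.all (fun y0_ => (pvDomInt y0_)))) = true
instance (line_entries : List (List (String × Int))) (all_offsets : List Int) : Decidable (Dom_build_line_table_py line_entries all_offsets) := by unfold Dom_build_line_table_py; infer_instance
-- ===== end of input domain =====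

-- B replaces A's per-entry scan of all offsets by one binary search per offset into the
-- sorted entry starts, bucketing offsets per entry (objective: faster, asymptotic).

-- ===== PORT A =====
def build_line_table_py (line_entries : List (List (String × Int))) (all_offsets : List Int) : List (Int × Int) :=
  if line_entries = [] then []
  else
    let sorted_entries := PySem.List.sorted line_entries (fun e => PySem.Dict.getD ⟨e⟩ "offset" 0)
    ((PySem.List.enumerate sorted_entries).foldl (fun line_table ie =>
      let start_offset := PySem.Dict.getD ⟨ie.2⟩ "offset" 0
      let line := PySem.Dict.getD ⟨ie.2⟩ "line" 0
      -- float('inf') as upper bound is ported as Option none (no upper bound); exact since offsets are Ints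
      let end_offset : Option Int :=
        if ie.1 + 1 < (sorted_entries.length : Int) then
          some (PySem.Dict.getD ⟨PySem.List.pyGetD sorted_entries (ie.1 + 1) []⟩ "offset" 0)
        else none
      all_offsets.foldl (fun lt offset =>
        if decide (start_offset ≤ offset) && end_offset.all (fun e => decide (offset < e)) then
          lt.insert offset line
        else lt) line_table) PySem.Dict.empty).items

-- ===== PORT B =====
def build_line_table_py_alt (line_entries : List (List (String × Int))) (all_offsets : List Int) : List (Int × Int) :=
  if line_entries = [] then []
  else
    let sorted_entries := PySem.List.sorted line_entries (fun e => PySem.Dict.getD ⟨e⟩ "offset" 0)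
    let starts := sorted_entries.map (fun e => PySem.Dict.getD ⟨e⟩ "offset" 0)
    let lines := sorted_entries.map (fun e => PySem.Dict.getD ⟨e⟩ "line" 0)
    let buckets : List (List Int) := List.replicate starts.length ([] : List Int)
    -- Source B's _bisect_right is the stdlib bisect_right loop; PySem.List.bisectRight is that exact loop
    let buckets := all_offsets.foldl (fun bs offset =>
      let lo := PySem.List.bisectRight starts offset
      if 0 < lo then bs.set (lo - 1) (bs.getD (lo - 1) [] ++ [offset]) else bs) buckets
    ((lines.zip buckets).foldl (fun lt lb =>
      lb.2.foldl (fun lt offset => lt.insert offset lb.1) lt) PySem.Dict.empty).items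

-- ===== PRECONDITION & SPEC =====
def Spec_build_line_table_py (line_entries : List (List (String × Int))) (all_offsets : List Int) (out : List (Int × Int)) : Prop := out = build_line_table_py_alt line_entries all_offsets
instance (line_entries : List (List (String × Int))) (all_offsets : List Int) (out : List (Int × Int)) : Decidable (Spec_build_line_table_py line_entries all_offsets out) := by unfold Spec_build_line_table_py; infer_instance

-- ===== CLAIM (what is proved, stated in full; the proofs are below) =====
def Claim_equal_build_line_table_py : Prop := ∀ (line_entries : List (List (String × Int))) (all_offsets : List Int), Dom_build_line_table_py line_entries all_offsets → Spec_build_line_table_py line_entries all_offsets (build_line_table_py line_entries all_offsets)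

-- ===== LEMMAS AND PROOFS =====

-- a loop whose body is itself a fold is a fold over the flattened list
lemma pv_foldl_foldl_flatMap {β γ δ : Type} (F : β → List γ) (g : δ → γ → δ)
    (L : List β) (init : δ) :
    L.foldl (fun d b => (F b).foldl g d) init = (L.flatMap F).foldl g init := by
  induction L generalizing init with
  | nil => rfl
  | cons b L ih => simp [List.flatMap_cons, List.foldl_append, ih]

-- 'if c o: d[o] = ln' over a list is a fold of insertions over the filtered, paired list
lemma pv_foldl_insert_filter_map (c : Int → Bool) (ln : Int) (offs : List Int)
    (d : PySem.Dict Int Int) :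
    offs.foldl (fun lt o => if c o then lt.insert o ln else lt) d
      = ((offs.filter c).map (fun o => (o, ln))).foldl (fun d kv => d.insert kv.1 kv.2) d := by
  rw [PySem.List.foldl_if_eq_foldl_filter, List.foldl_map]

-- the bucket-filling loop preserves the number of buckets
lemma pv_buckets_len (g : Int → Nat) (offs : List Int) :
    ∀ (bs : List (List Int)),
      (offs.foldl (fun bs o => if 0 < g o then bs.set (g o - 1) (bs.getD (g o - 1) [] ++ [o]) else bs) bs).length
        = bs.length := by
  induction offs with
  | nil => intro bs; rfl
  | cons o offs ih =>
    intro bs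
    simp only [List.foldl_cons]
    by_cases h : 0 < g o
    · rw [if_pos h, ih, List.length_set]
    · rw [if_neg h, ih]

-- bucket j of the bucket-filling loop collects exactly the offsets with g o = j + 1
lemma pv_buckets_getD (g : Int → Nat) (offs : List Int) (j : Nat) :
    ∀ (bs : List (List Int)), j < bs.length →
      (offs.foldl (fun bs o => if 0 < g o then bs.set (g o - 1) (bs.getD (g o - 1) [] ++ [o]) else bs) bs).getD j []
        = bs.getD j [] ++ offs.filter (fun o => g o == j + 1) := by
  induction offs with
  | nil => intro bs _; simp
  | cons o offs ih =>
    intro bs hj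
    by_cases h : 0 < g o
    · by_cases he : g o = j + 1
      · have hj' : g o - 1 = j := by omega
        simp only [List.foldl_cons, h, List.filter_cons]
        rw [ih _ (by simpa using hj)]
        simp [List.getD_eq_getElem?_getD, hj, he, List.append_assoc]
      · have hj' : g o - 1 ≠ j := by omega
        simp only [List.foldl_cons, if_pos h, List.filter_cons]
        rw [ih _ (by simpa using hj)]
        simp [List.getD_eq_getElem?_getD, hj', he]
    · have he : ¬ (g o = j + 1) := by omega
      simp only [List.foldl_cons, if_neg h, List.filter_cons]
      rw [ih _ hj]
      simp [he]

-- characterisation of bisect_right on a sorted list: it returns j+1 exactly on [starts[j], starts[j+1])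
lemma pv_bisect_eq_iff (starts : List Int) (hp : starts.Pairwise (· ≤ ·))
    (o : Int) (j : Nat) (hj : j < starts.length) :
    (PySem.List.bisectRight starts o = j + 1)
      ↔ (starts[j] ≤ o ∧ (∀ hj1 : j + 1 < starts.length, o < starts[j + 1])) := by
  obtain ⟨hle, h1, h2⟩ := PySem.List.bisectRight_spec starts o hp
  constructor
  · intro hr
    refine ⟨h1 j hj (by omega), fun hj1 => h2 (j+1) hj1 (by omega)⟩
  · rintro ⟨hs, hlt⟩
    by_contra hne
    rcases Nat.lt_or_ge (PySem.List.bisectRight starts o) (j+1) with hlt' | hge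
    · exact absurd hs (not_le.mpr (h2 j hj (by omega)))
    · have hj1 : j + 1 < starts.length := by omega
      exact absurd (h1 (j+1) hj1 (by omega)) (not_le.mpr (hlt hj1))

-- flatMap respects pointwise equality of its function on the list
lemma pv_flatMap_congr {α β : Type} {l : List α} {f g : α → List β}
    (h : ∀ x ∈ l, f x = g x) : l.flatMap f = l.flatMap g := by
  induction l with
  | nil => rfl
  | cons x l ih =>
    simp only [List.flatMap_cons, h x (List.mem_cons_self), ih (fun y hy => h y (List.mem_cons_of_mem x hy))]

-- 'd[o] = ln' over a list is a fold of insertions over the paired list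
lemma pv_foldl_insert_map (ln : Int) (l : List Int) (d : PySem.Dict Int Int) :
    l.foldl (fun lt o => lt.insert o ln) d
      = (l.map (fun o => (o, ln))).foldl (fun d kv => d.insert kv.1 kv.2) d := by
  rw [List.foldl_map]

-- ===== VERDICT (by name: the statement is the Claim_ definition above) =====
theorem build_line_table_py_spec : Claim_equal_build_line_table_py := by
  intro line_entries all_offsets _
  unfold Spec_build_line_table_py build_line_table_py build_line_table_py_alt
  by_cases hemp : line_entries = []
  · simp [hemp]
  simp only [if_neg hemp]
  set k : List (String × Int) → Int := fun e => PySem.Dict.getD ⟨e⟩ "offset" 0 with hk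
  set se : List (List (String × Int)) := PySem.List.sorted line_entries k with hse
  set starts : List Int := se.map k with hstarts
  set lines : List Int := se.map (fun e => PySem.Dict.getD ⟨e⟩ "line" 0) with hlines
  set bks : List (List Int) := all_offsets.foldl (fun bs offset =>
      if 0 < PySem.List.bisectRight starts offset then
        bs.set (PySem.List.bisectRight starts offset - 1)
          (bs.getD (PySem.List.bisectRight starts offset - 1) [] ++ [offset])
      else bs) (List.replicate starts.length ([] : List Int)) with hbks
  have hsl : starts.length = se.length := by rw [hstarts, List.length_map]
  have hll : lines.length = se.length := by rw [hlines, List.length_map]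
  have hp : starts.Pairwise (· ≤ ·) := by
    rw [hstarts, hse]; exact PySem.List.sorted_map_key_pairwise line_entries k
  have hbl : bks.length = se.length := by
    rw [hbks, pv_buckets_len (fun o => PySem.List.bisectRight starts o), List.length_replicate, hsl]
  -- both dict-building loops are folds of insertions over a flat key/value list
  simp only [pv_foldl_insert_map]
  simp only [pv_foldl_insert_filter_map]
  first
  | simp only [pv_foldl_foldl_flatMap]
  | rw [pv_foldl_foldl_flatMap, pv_foldl_foldl_flatMap]
  | rw [pv_foldl_foldl_flatMap (g := fun (d : PySem.Dict Int Int) (kv : Int × Int) => d.insert kv.1 kv.2)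
          (L := PySem.List.enumerate se),
        pv_foldl_foldl_flatMap (g := fun (d : PySem.Dict Int Int) (kv : Int × Int) => d.insert kv.1 kv.2)
          (L := lines.zip bks)]
  -- rewrite the zipped buckets as an indexed list over range
  have hzip : lines.zip bks = (List.range se.length).map (fun j =>
      (lines.getD j 0, all_offsets.filter (fun o => PySem.List.bisectRight starts o == j + 1))) := by
    apply List.ext_getElem
    · simp [List.length_zip, hbl, hll]
    · intro i h1 h2
      have hi : i < se.length := by simpa [List.length_zip, hbl, hll] using h1
      have hib : i < bks.length := by omega
      simp only [List.getElem_zip, List.getElem_map, List.getElem_range]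
      have e1 : lines[i]'(by omega) = lines.getD i 0 := (List.getD_eq_getElem _ _ (by omega)).symm
      have e2 : bks[i]'hib = all_offsets.filter (fun o => PySem.List.bisectRight starts o == i + 1) := by
        rw [← List.getD_eq_getElem bks [] hib, hbks,
          pv_buckets_getD (fun o => PySem.List.bisectRight starts o) all_offsets i _
            (by rw [List.length_replicate]; omega),
          List.getD_replicate _ (by omega : i < starts.length), List.nil_append]
      rw [e1, e2]
  rw [hzip, List.flatMap_map]
  -- rewrite A's enumerate loop as an indexed list over range
  rw [PySem.List.enumerate_eq_map_pyRange se ([] : List (String × Int)), List.flatMap_map]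
  simp only [PySem.List.len_eq]
  rw [PySem.List.pyRange_zero_natCast se.length, List.flatMap_map]
  -- compare the two indexed flat lists pointwise
  refine congrArg _ (congrArg _ (pv_flatMap_congr ?_))
  intro j hj
  have hjse : j < se.length := List.mem_range.mp hj
  have hjs : j < starts.length := by omega
  have e0 : PySem.List.pyGetD se (↑j) ([] : List (String × Int)) = se[j] := by
    rw [PySem.List.pyGetD_natCast, List.getD_eq_getElem _ _ hjse]
  rw [e0]
  have eline : PySem.Dict.getD ⟨se[j]⟩ "line" 0 = lines.getD j 0 := by
    rw [hlines, List.getD_eq_getElem _ _ (by simpa [List.length_map] using hjse), List.getElem_map]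
  have ekey : PySem.Dict.getD ⟨se[j]⟩ "offset" 0 = starts[j]'hjs := by
    simp only [hstarts, List.getElem_map, hk]
  rw [eline, ekey]
  have hcond : ∀ o ∈ all_offsets,
      (decide (starts[j]'hjs ≤ o) &&
        (if (↑j + 1 : Int) < (↑se.length : Int) then
            some (PySem.Dict.getD ⟨PySem.List.pyGetD se (↑j + 1) ([] : List (String × Int))⟩ "offset" 0)
          else none).all (fun e => decide (o < e)))
        = (PySem.List.bisectRight starts o == j + 1) := by
    intro o _
    by_cases hj1 : j + 1 < se.length
    · have hj1' : j + 1 < starts.length := by omega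
      have hc : (↑j + 1 : Int) < (↑se.length : Int) := by exact_mod_cast hj1
      rw [if_pos hc]
      have e3 : PySem.List.pyGetD se (↑j + 1) ([] : List (String × Int)) = se[j+1]'hj1 := by
        rw [show ((j : Int) + 1) = ((j + 1 : Nat) : Int) by push_cast; ring,
          PySem.List.pyGetD_natCast, List.getD_eq_getElem _ _ hj1]
      rw [e3]
      have ekey' : PySem.Dict.getD ⟨se[j+1]'hj1⟩ "offset" 0 = starts[j+1]'hj1' := by
        simp only [hstarts, List.getElem_map, hk]
      rw [ekey', Bool.eq_iff_iff]
      simp only [Option.all_some, Bool.and_eq_true, decide_eq_true_eq, beq_iff_eq,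
        pv_bisect_eq_iff starts hp o j hjs]
      constructor
      · rintro ⟨ha, hb⟩; exact ⟨ha, fun _ => hb⟩
      · rintro ⟨ha, hb⟩; exact ⟨ha, hb hj1'⟩
    · have hj1' : ¬ (j + 1 < starts.length) := by omega
      have hc : ¬ ((↑j + 1 : Int) < (↑se.length : Int)) := by
        intro hcc; exact hj1 (by exact_mod_cast hcc)
      rw [if_neg hc, Bool.eq_iff_iff]
      simp only [Option.all_none, Bool.and_true, decide_eq_true_eq, beq_iff_eq,
        pv_bisect_eq_iff starts hp o j hjs]
      constructor
      · intro ha; exact ⟨ha, fun hcc => absurd hcc hj1'⟩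
      · rintro ⟨ha, _⟩; exact ha
  rw [List.filter_congr hcond]
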